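-- pv_equiv track=rewrite | github.com/ssm-kim/ProblemSolving | 프로그래머스/1/131128. 숫자 짝꿍/숫자 짝꿍.py | solution
-- ===== SOURCE A (Python) =====
-- def solution(X, Y):
--     answer = ''
--     dictX, dictY = {i:0 for i in range(0, 10)}, {i:0 for i in range(0, 10)}
--
--     for i in range(10):
--         dictX[i] = X.count(str(i))
--         dictY[i] = Y.count(str(i))
--
--     for k in range(9, -1, -1):
--         minCnt = min(dictX[k], dictY[k])
--         # if answer == '' and k == 0 and minCnt > 0:
--         #     answer = '0'
--         #     break
--
--         answer += (str(k) * minCnt)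
--
--     if not answer:
--         answer = '-1'
--
--     if len(answer) == answer.count('0'):
--         answer = '0'
--
--     return answer
-- ===== SOURCE B (Python) =====
-- def solution(X, Y):
--     sx = sorted((c for c in X if c.isdigit()), reverse=True)
--     sy = sorted((c for c in Y if c.isdigit()), reverse=True)
--     out = []
--     i = j = 0
--     while i < len(sx) and j < len(sy):
--         if sx[i] == sy[j]:
--             out.append(sx[i])
--             i += 1
--             j += 1
--         elif sx[i] > sy[j]:
--             i += 1
--         else:
--             j += 1
--     answer = ''.join(out)
--     if not answer:
--         answer = '-1'
--     if len(answer) == answer.count('0'):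
--         answer = '0'
--     return answer
-- ===== Notes on version B (the rewrite author's own statement) =====
-- stated objective: alternative
-- what changed: Replaces A's two per-digit counting dictionaries and per-digit string multiplication by sorting each argument's digit characters descending and extracting the common multiset with a single two-pointer merge.
import Mathlib
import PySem

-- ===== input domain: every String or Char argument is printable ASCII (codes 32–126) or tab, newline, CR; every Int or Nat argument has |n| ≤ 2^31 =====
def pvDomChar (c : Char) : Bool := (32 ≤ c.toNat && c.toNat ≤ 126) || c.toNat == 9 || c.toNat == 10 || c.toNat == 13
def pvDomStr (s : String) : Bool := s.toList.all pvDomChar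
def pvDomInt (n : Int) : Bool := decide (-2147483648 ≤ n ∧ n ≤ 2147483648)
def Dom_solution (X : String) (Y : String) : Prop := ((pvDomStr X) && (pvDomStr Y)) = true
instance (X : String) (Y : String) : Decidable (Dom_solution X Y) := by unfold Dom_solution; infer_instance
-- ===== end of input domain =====

-- B replaces A's per-digit counting dictionaries by a descending merge of the two sorted digit lists (alternative decomposition, same cost class).

-- ===== PORT A =====
-- Python "s * n" (empty for n ≤ 0); exact
def strRepeat (s : List Char) (n : Int) : List Char := (List.replicate n.toNat s).flatten

def solution (X : String) (Y : String) : String :=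
  let answer : List Char := []
  -- {i: 0 for i in range(0, 10)} twice
  let dictX : PySem.Dict Int Int := (PySem.List.pyRange 0 10 1).foldl (fun d i => d.insert i 0) ∅
  let dictY : PySem.Dict Int Int := (PySem.List.pyRange 0 10 1).foldl (fun d i => d.insert i 0) ∅
  -- for i in range(10): dictX[i] = X.count(str(i)); dictY[i] = Y.count(str(i))
  let st := (PySem.List.pyRange 0 10 1).foldl
      (fun (p : PySem.Dict Int Int × PySem.Dict Int Int) i =>
        (p.1.insert i ((PySem.Str.count X (PySem.Int.toStr i) : Int)),
         p.2.insert i ((PySem.Str.count Y (PySem.Int.toStr i) : Int)))) (dictX, dictY)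
  -- for k in range(9, -1, -1): answer += str(k) * min(dictX[k], dictY[k])
  -- (dictX[k]/dictY[k]: the key is always present, so the getD default is never used)
  let answer := (PySem.List.pyRange 9 (-1) (-1)).foldl
      (fun ans k =>
        let minCnt := min ((st.1).getD k 0) ((st.2).getD k 0)
        ans ++ strRepeat (PySem.Int.toChars k) minCnt) answer
  let answer := if answer.isEmpty then ['-', '1'] else answer
  let answer := if answer.length = PySem.Chars.count answer ['0'] then ['0'] else answer
  String.ofList answer

-- ===== PORT B =====
-- the two-pointer while loop of Source B as recursion on the two suffixes at i, j
def pvMerge : List Char → List Char → List Char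
  | c :: cs, d :: ds =>
      if c = d then c :: pvMerge cs ds
      else if d < c then pvMerge cs (d :: ds)
      else pvMerge (c :: cs) ds
  | _, _ => []
termination_by a b => a.length + b.length
decreasing_by all_goals simp <;> omega

def solution_alt (X : String) (Y : String) : String :=
  -- sorted((c for c in X if c.isdigit()), reverse=True); c.isdigit() on one char is PySem.Chars.isdigit (exact)
  let sx := PySem.List.sorted (X.toList.filter PySem.Chars.isdigit) (fun c => c) true
  let sy := PySem.List.sorted (Y.toList.filter PySem.Chars.isdigit) (fun c => c) true
  let answer := pvMerge sx sy
  let answer := if answer.isEmpty then ['-', '1'] else answer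
  let answer := if answer.length = PySem.Chars.count answer ['0'] then ['0'] else answer
  String.ofList answer

-- ===== PRECONDITION & SPEC =====
def Spec_solution (X : String) (Y : String) (out : String) : Prop := out = solution_alt X Y
instance (X : String) (Y : String) (out : String) : Decidable (Spec_solution X Y out) := by unfold Spec_solution; infer_instance

-- ===== CLAIM (what is proved, stated in full; the proofs are below) =====
def Claim_equal_solution : Prop := ∀ (X : String) (Y : String), Dom_solution X Y → Spec_solution X Y (solution X Y)

-- ===== LEMMAS AND PROOFS =====

-- the ten digit characters, descending
def digitChars : List Char := ['9', '8', '7', '6', '5', '4', '3', '2', '1', '0']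

-- the common-digit multiset in descending order, given per-character multiplicities
def canonOf (f : Char → Nat) : List Char := digitChars.flatMap (fun c => List.replicate (f c) c)

theorem count_go_single (c : Char) : ∀ (fuel : Nat) (s : List Char) (acc : Nat),
    s.length ≤ fuel → PySem.Chars.count.go [c] fuel s acc = acc + s.count c := by
  intro fuel
  induction fuel with
  | zero =>
    intro s acc h
    cases s with
    | nil => simp [PySem.Chars.count.go]
    | cons d t => simp at h
  | succ n ih =>
    intro s acc h
    cases s with
    | nil => simp [PySem.Chars.count.go]
    | cons d t =>
      simp only [PySem.Chars.count.go, List.isPrefixOf, List.length_cons] at *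
      by_cases hc : c = d
      · subst hc
        simp [List.drop, ih t (acc + 1) (by omega)]
        omega
      · simp [hc, Ne.symm hc, ih t acc (by omega), beq_iff_eq]

theorem count_single (s : List Char) (c : Char) : PySem.Chars.count s [c] = s.count c := by
  simpa [PySem.Chars.count] using count_go_single c s.length s 0 le_rfl

theorem isdigit_mem (c : Char) (h : PySem.Chars.isdigit c = true) : c ∈ digitChars := by
  simp only [PySem.Chars.isdigit, Bool.and_eq_true, decide_eq_true_eq] at h
  obtain ⟨h1, h2⟩ := h
  have h1' : 48 ≤ c.toNat := Nat.succ_le_of_lt h1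
  have h2' : c.toNat ≤ 57 := h2
  have e : c = Char.ofNat c.toNat := (Char.ofNat_toNat c).symm
  interval_cases h3 : c.toNat <;> (subst e; decide)

theorem mem_isdigit (c : Char) (h : c ∈ digitChars) : PySem.Chars.isdigit c = true := by
  simp only [digitChars, List.mem_cons, List.not_mem_nil, or_false] at h
  rcases h with h | h | h | h | h | h | h | h | h | h <;> subst h <;> decide

theorem flatten_replicate_singleton (n : Nat) (c : Char) :
    (List.replicate n [c]).flatten = List.replicate n c := by
  induction n with
  | zero => rfl
  | succ k ih => simp [List.replicate_succ, ih]

theorem mem_flat_digit (ks : List Char) (f : Char → Nat) (d : Char)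
    (h : d ∈ ks.flatMap (fun c => List.replicate (f c) c)) : d ∈ ks := by
  simp only [List.mem_flatMap] at h
  obtain ⟨c, hc, hd⟩ := h
  rw [List.eq_of_mem_replicate hd]
  exact hc

theorem mergeL (c : Char) : ∀ (k : Nat) (u v : List Char),
    (∀ d ∈ v, d < c) → pvMerge (List.replicate k c ++ u) v = pvMerge u v := by
  intro k
  induction k with
  | zero => intro u v _; rfl
  | succ m ih =>
    intro u v hv
    cases v with
    | nil => simp [List.replicate_succ, pvMerge]
    | cons d ds =>
      have hd : d < c := hv d (by simp)
      simp only [List.replicate_succ, List.cons_append, pvMerge,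
        if_neg (ne_of_gt hd), if_pos hd]
      exact ih u (d :: ds) hv

theorem mergeR (c : Char) : ∀ (k : Nat) (u v : List Char),
    (∀ d ∈ u, d < c) → pvMerge u (List.replicate k c ++ v) = pvMerge u v := by
  intro k
  induction k with
  | zero => intro u v _; rfl
  | succ m ih =>
    intro u v hu
    cases u with
    | nil => simp [List.replicate_succ, pvMerge]
    | cons d ds =>
      have hd : d < c := hu d (by simp)
      simp only [List.replicate_succ, List.cons_append, pvMerge,
        if_neg (ne_of_gt hd).symm, if_neg (by exact not_lt_of_gt hd)]
      exact ih (d :: ds) v hu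

theorem merge_block (c : Char) : ∀ (a b : Nat) (u v : List Char),
    (∀ d ∈ u, d < c) → (∀ d ∈ v, d < c) →
    pvMerge (List.replicate a c ++ u) (List.replicate b c ++ v)
      = List.replicate (min a b) c ++ pvMerge u v := by
  intro a
  induction a with
  | zero =>
    intro b u v hu hv
    simpa using mergeR c b u v hu
  | succ m ih =>
    intro b u v hu hv
    cases b with
    | zero => simpa using mergeL c (m + 1) u v hv
    | succ n =>
      simp only [List.replicate_succ, List.cons_append, pvMerge]
      rw [ih n u v hu hv]
      simp [Nat.succ_min_succ, List.replicate_succ]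

theorem merge_flat : ∀ (ks : List Char), ks.Pairwise (fun a b => b < a) → ∀ (f g : Char → Nat),
    pvMerge (ks.flatMap fun c => List.replicate (f c) c) (ks.flatMap fun c => List.replicate (g c) c)
      = ks.flatMap fun c => List.replicate (min (f c) (g c)) c := by
  intro ks
  induction ks with
  | nil => intro _ f g; simp [pvMerge]
  | cons c ks ih =>
    intro hk f g
    have hhead : ∀ b ∈ ks, b < c := fun b hb => (List.pairwise_cons.mp hk).1 b hb
    have htail := (List.pairwise_cons.mp hk).2
    simp only [List.flatMap_cons]
    rw [merge_block c (f c) (g c) _ _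
      (fun d hd => hhead d (mem_flat_digit ks f d hd))
      (fun d hd => hhead d (mem_flat_digit ks g d hd)),
      ih htail f g]

theorem sorted_rev_id_unique (xs ys : List Char) (hp : ys.Perm xs)
    (hs : List.Pairwise (fun a b => b ≤ a) ys) : PySem.List.sorted xs (fun c => c) true = ys := by
  exact List.Perm.eq_of_pairwise
    (fun a b _ _ h1 h2 => le_antisymm h2 h1)
    (PySem.List.sorted_pairwise_rev xs (fun c => c)) hs
    ((PySem.List.sorted_perm xs (fun c => c) true).trans hp.symm)

theorem pairwise_flat (ks : List Char) (hk : ks.Pairwise (fun a b => b < a)) (f : Char → Nat) :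
    List.Pairwise (fun a b => b ≤ a) (ks.flatMap fun c => List.replicate (f c) c) := by
  induction ks with
  | nil => simp
  | cons c ks ih =>
    have hhead : ∀ b ∈ ks, b < c := fun b hb => (List.pairwise_cons.mp hk).1 b hb
    have htail := (List.pairwise_cons.mp hk).2
    simp only [List.flatMap_cons]
    refine List.pairwise_append.mpr ⟨?_, ih htail, ?_⟩
    · exact List.pairwise_replicate.mpr (Or.inr le_rfl)
    · intro a ha b hb
      rw [List.eq_of_mem_replicate ha]
      exact le_of_lt (hhead b (mem_flat_digit ks f b hb))

theorem sorted_digits (l : List Char) :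
    PySem.List.sorted (l.filter PySem.Chars.isdigit) (fun c => c) true
      = canonOf (fun c => l.count c * (if PySem.Chars.isdigit c then 1 else 0)) := by
  apply sorted_rev_id_unique
  · rw [List.perm_iff_count]
    intro x
    by_cases hx : PySem.Chars.isdigit x = true
    · have hm := isdigit_mem x hx
      rw [List.count_filter hx]
      simp only [digitChars, List.mem_cons, List.not_mem_nil, or_false] at hm
      rcases hm with e | e | e | e | e | e | e | e | e | e <;> subst e <;>
        simp [canonOf, digitChars, List.count_replicate, hx]
    · have hm : x ∉ digitChars := fun h => hx (mem_isdigit x h)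
      have h2 : x ∉ l.filter PySem.Chars.isdigit := fun h => hx (List.of_mem_filter h)
      rw [List.count_eq_zero.mpr h2]
      simp only [digitChars, List.mem_cons, List.not_mem_nil, or_false] at hm
      push Not at hm
      obtain ⟨n9, n8, n7, n6, n5, n4, n3, n2, n1, n0⟩ := hm
      simp [canonOf, digitChars, List.count_replicate, Ne.symm n9, Ne.symm n8, Ne.symm n7,
        Ne.symm n6, Ne.symm n5, Ne.symm n4, Ne.symm n3, Ne.symm n2, Ne.symm n1, Ne.symm n0]
  · exact pairwise_flat digitChars (by decide) _

theorem coreB (X Y : List Char) :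
    pvMerge (PySem.List.sorted (X.filter PySem.Chars.isdigit) (fun c => c) true)
            (PySem.List.sorted (Y.filter PySem.Chars.isdigit) (fun c => c) true)
      = canonOf (fun c => min (X.count c) (Y.count c)) := by
  rw [sorted_digits X, sorted_digits Y]
  unfold canonOf
  rw [merge_flat digitChars (by decide)]
  simp [digitChars, PySem.Chars.isdigit]

theorem toNat_min_cast (a b : Nat) : (min (a : Int) (b : Int)).toNat = min a b := by
  omega

theorem coreA (X Y : String) :
    ((PySem.List.pyRange 9 (-1) (-1)).foldl
      (fun ans k =>
        let minCnt := min
          (((((PySem.List.pyRange 0 10 1).foldl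
            (fun (p : PySem.Dict Int Int × PySem.Dict Int Int) i =>
              (p.1.insert i ((PySem.Str.count X (PySem.Int.toStr i) : Int)),
               p.2.insert i ((PySem.Str.count Y (PySem.Int.toStr i) : Int))))
            ((PySem.List.pyRange 0 10 1).foldl (fun d i => d.insert i 0) ∅,
             (PySem.List.pyRange 0 10 1).foldl (fun d i => d.insert i 0) ∅)).1).getD k 0))
          (((((PySem.List.pyRange 0 10 1).foldl
            (fun (p : PySem.Dict Int Int × PySem.Dict Int Int) i =>
              (p.1.insert i ((PySem.Str.count X (PySem.Int.toStr i) : Int)),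
               p.2.insert i ((PySem.Str.count Y (PySem.Int.toStr i) : Int))))
            ((PySem.List.pyRange 0 10 1).foldl (fun d i => d.insert i 0) ∅,
             (PySem.List.pyRange 0 10 1).foldl (fun d i => d.insert i 0) ∅)).2).getD k 0))
        ans ++ strRepeat (PySem.Int.toChars k) minCnt) ([] : List Char))
      = canonOf (fun c => min (X.toList.count c) (Y.toList.count c)) := by
  rw [show PySem.List.pyRange 0 10 1 = ([0,1,2,3,4,5,6,7,8,9] : List Int) from by decide,
      show PySem.List.pyRange 9 (-1) (-1) = ([9,8,7,6,5,4,3,2,1,0] : List Int) from by decide]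
  simp only [List.foldl_cons, List.foldl_nil]
  simp only [PySem.Dict.getD_insert]
  simp only [strRepeat, PySem.Str.count_eq, PySem.Int.toList_toStr,
    show PySem.Int.toChars 0 = ['0'] from by decide, show PySem.Int.toChars 1 = ['1'] from by decide,
    show PySem.Int.toChars 2 = ['2'] from by decide, show PySem.Int.toChars 3 = ['3'] from by decide,
    show PySem.Int.toChars 4 = ['4'] from by decide, show PySem.Int.toChars 5 = ['5'] from by decide,
    show PySem.Int.toChars 6 = ['6'] from by decide, show PySem.Int.toChars 7 = ['7'] from by decide,
    show PySem.Int.toChars 8 = ['8'] from by decide, show PySem.Int.toChars 9 = ['9'] from by decide,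
    count_single, flatten_replicate_singleton]
  simp [canonOf, digitChars, toNat_min_cast]

-- ===== VERDICT (by name: the statement is the Claim_ definition above) =====
theorem solution_spec : Claim_equal_solution := by
  intro X Y _
  show solution X Y = solution_alt X Y
  simp only [solution, solution_alt]
  rw [coreA X Y, coreB X.toList Y.toList]
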